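-- pv_equiv track=rewrite | github.com/ann-vasileva/word_segmentation | src/utils.py | get_space_indices
-- ===== SOURCE A (Python) =====
-- def get_space_indices(text):
--     positions = []
--     offset = 0
--     for i, ch in enumerate(text):
--         if ch == ' ':
--             positions.append(i + offset)
--             offset -= 1
--     return str(positions)
-- ===== SOURCE B (Python) =====
-- def get_space_indices(text):
--     words = text.split(' ')
--     positions = []
--     total = 0
--     for w in words[:-1]:
--         total += len(w)
--         positions.append(total)
--     return str(positions)
-- ===== Notes on version B (the rewrite author's own statement) =====
-- stated objective: faster
-- what changed: B splits the text on the space separator and emits the running cumulative length of the preceding words, instead of A's per-character Python loop with an index-offset correction per space.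
import Mathlib
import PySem

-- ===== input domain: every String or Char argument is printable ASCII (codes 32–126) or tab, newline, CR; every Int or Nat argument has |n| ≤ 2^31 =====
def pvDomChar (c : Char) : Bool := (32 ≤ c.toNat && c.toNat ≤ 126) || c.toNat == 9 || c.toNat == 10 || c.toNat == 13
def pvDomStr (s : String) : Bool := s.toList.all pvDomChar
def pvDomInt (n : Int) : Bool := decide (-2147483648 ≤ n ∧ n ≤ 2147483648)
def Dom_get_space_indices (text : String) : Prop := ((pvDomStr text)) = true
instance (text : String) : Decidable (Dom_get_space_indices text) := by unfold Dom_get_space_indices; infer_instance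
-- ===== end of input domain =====

-- B replaces A's character scan with an index-offset correction by a split on ' '
-- plus a running cumulative word length (idiomatic; same return value).

-- Python's str([...]) on a list of ints: "[a, b, …]" (shared by both ports, both call str()).
def pyStrIntList (xs : List Int) : String :=
  "[" ++ PySem.Str.join ", " (xs.map PySem.Int.toStr) ++ "]"

-- ===== PORT A =====
def get_space_indices (text : String) : String :=
  let st := (PySem.List.enumerate text.toList 0).foldl
    (fun (s : List Int × Int) p =>
      if p.2 == ' ' then (s.1 ++ [p.1 + s.2], s.2 - 1) else s) ([], 0)
  pyStrIntList st.1

-- ===== PORT B =====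
-- text.split(' ') for a one-char separator is exactly List.splitOn ' ' on the characters;
-- words[:-1] is List.dropLast.
def get_space_indices_alt (text : String) : String :=
  let words := text.toList.splitOn ' '
  let st := words.dropLast.foldl
    (fun (s : Int × List Int) w =>
      let total := s.1 + (w.length : Int)
      (total, s.2 ++ [total])) (0, [])
  pyStrIntList st.2

-- ===== PRECONDITION & SPEC =====
def Spec_get_space_indices (text : String) (out : String) : Prop := out = get_space_indices_alt text
instance (text : String) (out : String) : Decidable (Spec_get_space_indices text out) := by unfold Spec_get_space_indices; infer_instance

-- ===== CLAIM (what is proved, stated in full; the proofs are below) =====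
def Claim_equal_get_space_indices : Prop := ∀ (text : String), Dom_get_space_indices text → Spec_get_space_indices text (get_space_indices text)

-- ===== LEMMAS AND PROOFS =====

-- Common specification: g cs n = the adjusted space positions of cs, n = number of
-- non-space characters already consumed.
def gsiSpec : List Char → Int → List Int
  | [], _ => []
  | c :: cs, n => if c = ' ' then n :: gsiSpec cs n else gsiSpec cs (n + 1)

theorem gsi_a_eq (cs : List Char) : ∀ (i off : Int) (acc : List Int),
    ((PySem.List.enumerate cs i).foldl
      (fun (s : List Int × Int) p =>
        if p.2 == ' ' then (s.1 ++ [p.1 + s.2], s.2 - 1) else s) (acc, off)).1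
    = acc ++ gsiSpec cs (i + off) := by
  induction cs with
  | nil => intro i off acc; simp [PySem.List.enumerate_nil, gsiSpec]
  | cons c cs ih =>
    intro i off acc
    rw [PySem.List.enumerate_cons, List.foldl_cons]
    by_cases hc : c = ' '
    · subst hc
      rw [if_pos (by exact rfl)]
      rw [ih (i + 1) (off - 1) (acc ++ [i + off])]
      have : i + 1 + (off - 1) = i + off := by ring
      rw [this]
      simp [gsiSpec]
    · rw [if_neg (by simp [hc])]
      rw [ih (i + 1) off acc]
      have : i + 1 + off = i + off + 1 := by ring
      rw [this]
      simp [gsiSpec, hc]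

theorem splitOn_ne_nil' (cs : List Char) : cs.splitOn ' ' ≠ [] := by
  simp [List.splitOn]
  exact List.splitOnP_ne_nil _ _

theorem gsi_b_eq (cs : List Char) : ∀ (w : List Char) (total : Int) (acc : List Int),
    ((((cs.splitOn ' ').modifyHead (fun t => w ++ t)).dropLast).foldl
      (fun (s : Int × List Int) v =>
        let total := s.1 + (v.length : Int)
        (total, s.2 ++ [total])) (total, acc)).2
    = acc ++ gsiSpec cs (total + (w.length : Int)) := by
  induction cs with
  | nil =>
    intro w total acc
    simp [List.splitOn, List.splitOnP, List.splitOnP.go, gsiSpec]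
  | cons c cs ih =>
    intro w total acc
    by_cases hc : c = ' '
    · subst hc
      have hsplit : ((' ' : Char) :: cs).splitOn ' ' = [] :: cs.splitOn ' ' := by
        simp [List.splitOn, List.splitOnP_cons]
      rw [hsplit]
      obtain ⟨x, xs, hx⟩ := List.exists_cons_of_ne_nil (splitOn_ne_nil' cs)
      simp only [List.modifyHead]
      rw [List.dropLast_cons_of_ne_nil (by rw [hx]; exact List.cons_ne_nil _ _)]
      simp only [List.foldl_cons]
      have hid : (cs.splitOn ' ').modifyHead (fun t => ([] : List Char) ++ t)
          = cs.splitOn ' ' := by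
        rw [hx]; simp [List.modifyHead]
      have key := ih [] (total + (w.length : Int)) (acc ++ [total + (w.length : Int)])
      rw [hid] at key
      simp only [List.length_nil, Nat.cast_zero, add_zero] at key
      simp only [List.append_nil, key]
      simp [gsiSpec]
    · have hsplit : (c :: cs).splitOn ' ' = (cs.splitOn ' ').modifyHead (fun t => c :: t) := by
        simp [List.splitOn, List.splitOnP_cons, hc]
      rw [hsplit]
      have hcomp : ((cs.splitOn ' ').modifyHead (fun t => c :: t)).modifyHead (fun t => w ++ t)
          = (cs.splitOn ' ').modifyHead (fun t => (w ++ [c]) ++ t) := by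
        obtain ⟨x, xs, hx⟩ := List.exists_cons_of_ne_nil (splitOn_ne_nil' cs)
        rw [hx]; simp [List.modifyHead]
      rw [hcomp, ih (w ++ [c]) total acc]
      have : total + ((w ++ [c]).length : Int) = total + (w.length : Int) + 1 := by
        simp; ring
      rw [this]
      simp [gsiSpec, hc]

-- ===== VERDICT (by name: the statement is the Claim_ definition above) =====
theorem get_space_indices_spec : Claim_equal_get_space_indices := by
  intro text _
  unfold Spec_get_space_indices get_space_indices get_space_indices_alt
  simp only []
  congr 1
  have ha := gsi_a_eq text.toList 0 0 []
  have hb := gsi_b_eq text.toList [] 0 []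
  have hid : (text.toList.splitOn ' ').modifyHead (fun t => ([] : List Char) ++ t)
      = text.toList.splitOn ' ' := by
    cases h : text.toList.splitOn ' ' with
    | nil => rfl
    | cons a as => simp [List.modifyHead]
  rw [hid] at hb
  simp only [List.nil_append, List.length_nil] at ha hb
  rw [ha, hb]
  norm_num
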